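-- pv_equiv track=rewrite | github.com/dmarek03/INTRODUCTION_TO_COMPUTER_SCIENCE | KOLOKWIA/zad_3.py | change_to_dec
-- ===== SOURCE A (Python) =====
-- def change_to_dec(number: int) -> int:
--     n_abs = abs(number)
--     new_number = 0
--     mult = 1
--     while n_abs > 0:
--         new_number += mult * (n_abs % 10)
--         n_abs //= 10
--         mult *= 2
--     return new_number
-- ===== SOURCE B (Python) =====
-- def change_to_dec(number: int) -> int:
--     result = 0
--     for ch in str(abs(number)):
--         result = result * 2 + int(ch)
--     return result
-- ===== Notes on version B (the rewrite author's own statement) =====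
-- stated objective: simpler
-- what changed: Replaces the LSB-first while-loop with an explicit power-of-two multiplier by an MSB-first Horner scheme (result = result*2 + digit) over str(abs(number)), with no power variable and no divmod loop state.
import Mathlib
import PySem

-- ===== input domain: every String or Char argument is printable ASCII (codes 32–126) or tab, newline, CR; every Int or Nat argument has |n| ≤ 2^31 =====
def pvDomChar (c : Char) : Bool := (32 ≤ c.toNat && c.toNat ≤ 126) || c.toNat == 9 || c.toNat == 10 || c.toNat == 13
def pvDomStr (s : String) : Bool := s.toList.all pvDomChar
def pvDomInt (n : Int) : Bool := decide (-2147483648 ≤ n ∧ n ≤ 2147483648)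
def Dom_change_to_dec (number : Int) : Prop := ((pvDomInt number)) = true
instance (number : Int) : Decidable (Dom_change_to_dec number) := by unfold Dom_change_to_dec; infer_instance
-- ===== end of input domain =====

-- B rewrites A's LSB-first while-loop (explicit power-of-two multiplier) as an
-- MSB-first Horner scheme over str(abs(number)); objective: simpler.

-- ===== PORT A =====
-- termination helper for the while-loop port (cited by decreasing_by)
theorem pv_fdiv10_toNat_lt (n : Int) (h : 0 < n) :
    (PySem.Int.floordiv n 10).toNat < n.toNat := by
  simp only [PySem.Int.floordiv, Int.fdiv_eq_ediv,
    if_pos (Or.inl (by norm_num : (0:Int) ≤ 10))]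
  omega

-- the while-loop of A: state (n_abs, new_number, mult)
def change_to_dec_loop (n_abs new_number mult : Int) : Int :=
  if h : 0 < n_abs then
    change_to_dec_loop (PySem.Int.floordiv n_abs 10)
      (new_number + mult * (PySem.Int.mod n_abs 10)) (mult * 2)
  else
    new_number
termination_by n_abs.toNat
decreasing_by exact pv_fdiv10_toNat_lt _ h

def change_to_dec (number : Int) : Int :=
  change_to_dec_loop |number| 0 1

-- ===== PORT B =====
-- result = result*2 + int(ch); int(ch) ported as (ch.toNat - 48), exact for the
-- decimal digit characters that str(abs(number)) yields
def pvHorner (r : Int) (c : Char) : Int := r * 2 + ((c.toNat : Int) - 48)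

def change_to_dec_alt (number : Int) : Int :=
  (PySem.Int.toStr |number|).toList.foldl pvHorner 0

-- ===== PRECONDITION & SPEC =====
def Spec_change_to_dec (number : Int) (out : Int) : Prop := out = change_to_dec_alt number
instance (number : Int) (out : Int) : Decidable (Spec_change_to_dec number out) := by unfold Spec_change_to_dec; infer_instance

-- ===== CLAIM (what is proved, stated in full; the proofs are below) =====
def Claim_equal_change_to_dec : Prop := ∀ (number : Int), Dom_change_to_dec number → Spec_change_to_dec number (change_to_dec number)

-- ===== LEMMAS AND PROOFS =====

-- value both programs compute: digits of n weighted by powers of 2 (Horner form)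
def pvVal (n : Nat) : Int :=
  if n < 10 then (n : Int) else 2 * pvVal (n / 10) + ((n % 10 : Nat) : Int)
termination_by n
decreasing_by omega

-- number of decimal digits of n (as produced by toDigitsCore)
def pvLen (n : Nat) : Nat :=
  if n < 10 then 1 else pvLen (n / 10) + 1
termination_by n
decreasing_by omega

theorem pvVal_small (n : Nat) (h : n < 10) : pvVal n = (n : Int) := by
  rw [pvVal]; simp [h]

theorem pvVal_large (n : Nat) (h : ¬ n < 10) :
    pvVal n = 2 * pvVal (n / 10) + ((n % 10 : Nat) : Int) := by
  rw [pvVal]; simp [h]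

theorem pvLen_small (n : Nat) (h : n < 10) : pvLen n = 1 := by
  rw [pvLen]; simp [h]

theorem pvLen_large (n : Nat) (h : ¬ n < 10) : pvLen n = pvLen (n / 10) + 1 := by
  rw [pvLen]; simp [h]

theorem pvHorner_digit (r : Int) (m : Nat) (h : m < 10) :
    pvHorner r (Nat.digitChar m) = r * 2 + (m : Int) := by
  have hc : ((Nat.digitChar m).toNat : Int) - 48 = (m : Int) := by
    interval_cases m <;> decide
  unfold pvHorner
  rw [hc]

theorem pv_fdiv_cast (n : Nat) : PySem.Int.floordiv (n : Int) 10 = ((n / 10 : Nat) : Int) := by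
  simp only [PySem.Int.floordiv, Int.fdiv_eq_ediv,
    if_pos (Or.inl (by norm_num : (0:Int) ≤ 10))]
  omega

theorem pv_fmod_cast (n : Nat) : PySem.Int.mod (n : Int) 10 = ((n % 10 : Nat) : Int) := by
  simp only [PySem.Int.mod, Int.fmod_eq_emod]
  omega

theorem pv_foldl_toDigitsCore (f : Nat) :
    ∀ (n : Nat) (l : List Char) (r : Int), n ≤ f →
      (Nat.toDigitsCore 10 (f + 1) n l).foldl pvHorner r
        = l.foldl pvHorner (r * 2 ^ pvLen n + pvVal n) := by
  induction f with
  | zero =>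
    intro n l r hn
    have hn0 : n = 0 := by omega
    subst hn0
    have h1 : Nat.toDigitsCore 10 1 0 l = Nat.digitChar (0 % 10) :: l := by
      rw [Nat.toDigitsCore]; simp
    rw [h1]
    simp only [List.foldl]
    congr 1
    rw [pvHorner_digit r (0 % 10) (by omega), pvLen_small 0 (by omega),
      pvVal_small 0 (by omega)]
    norm_num
  | succ f ih =>
    intro n l r hn
    rw [Nat.toDigitsCore]
    by_cases h10 : n / 10 = 0
    · have hlt : n < 10 := by omega
      rw [if_pos h10]
      simp only [List.foldl]
      congr 1
      rw [pvHorner_digit r (n % 10) (by omega), pvLen_small n hlt, pvVal_small n hlt,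
        Nat.mod_eq_of_lt hlt]
      ring
    · rw [if_neg h10]
      have hge : ¬ n < 10 := by omega
      rw [ih (n / 10) _ r (by omega)]
      simp only [List.foldl]
      congr 1
      rw [pvHorner_digit _ (n % 10) (by omega), pvLen_large n hge, pvVal_large n hge]
      push_cast
      ring

theorem pv_foldl_toDigits (n : Nat) :
    (Nat.toDigits 10 n).foldl pvHorner 0 = pvVal n := by
  have := pv_foldl_toDigitsCore n n [] 0 (le_refl n)
  simpa [Nat.toDigits] using this

theorem pv_loop_eq (n : Nat) : ∀ (new_number mult : Int),
    change_to_dec_loop (n : Int) new_number mult = new_number + mult * pvVal n := by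
  induction n using Nat.strong_induction_on with
  | _ n ih =>
    intro new_number mult
    rw [change_to_dec_loop]
    by_cases h0 : 0 < (n : Int)
    · rw [dif_pos h0, pv_fdiv_cast, pv_fmod_cast, ih (n / 10) (by omega)]
      by_cases hlt : n < 10
      · rw [show n / 10 = 0 from by omega, pvVal_small 0 (by omega),
          pvVal_small n hlt, Nat.mod_eq_of_lt hlt]
        ring
      · rw [pvVal_large n hlt]
        ring
    · have hn0 : n = 0 := by omega
      subst hn0
      rw [dif_neg h0, pvVal_small 0 (by omega)]
      ring

theorem pv_alt_eq (number : Int) : change_to_dec_alt number = pvVal number.natAbs := by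
  unfold change_to_dec_alt
  have habs : |number| = ((number.natAbs : Nat) : Int) := Int.abs_eq_natAbs number
  rw [habs]
  have h1 : (PySem.Int.toStr ((number.natAbs : Nat) : Int)).toList
      = Nat.toDigits 10 number.natAbs := by
    rw [PySem.Int.toList_toStr, PySem.Int.toChars, if_neg (by omega)]
    rw [Int.toNat_natCast]
  rw [h1, pv_foldl_toDigits]

-- ===== VERDICT (by name: the statement is the Claim_ definition above) =====
theorem change_to_dec_spec : Claim_equal_change_to_dec := by
  intro number _
  unfold Spec_change_to_dec change_to_dec
  rw [Int.abs_eq_natAbs, pv_loop_eq, pv_alt_eq]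
  ring
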